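-- pv_equiv track=rewrite | github.com/sueszli/vector-database-benchmark | dataset/python-mutated/payloads.py | generate_python
-- ===== SOURCE A (Python) =====
-- def generate_python(data):
--     if False:
--         return 10
--     res = 'payload = (\n    "'
--     for (idx, x) in enumerate(data):
--         if idx % 15 == 0 and idx != 0:
--             res += '"\n    "'
--         res += '\\x%02x' % x
--     res += '"\n)'
--     return res
-- ===== SOURCE B (Python) =====
-- def generate_python(data):
--     lines = []
--     rest = data
--     while rest:
--         chunk, rest = rest[:15], rest[15:]
--         lines.append(''.join('\\x%02x' % x for x in chunk))
--     return 'payload = (\n    "' + '"\n    "'.join(lines) + '"\n)'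
-- ===== Notes on version B (the rewrite author's own statement) =====
-- stated objective: simpler
-- what changed: B chunks the data into groups of 15, formats each chunk into a line string with a join, and joins the lines with the quote-newline separator, instead of A's single per-byte loop that decides via idx % 15 whether to splice the separator into the accumulating string.
import Mathlib
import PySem

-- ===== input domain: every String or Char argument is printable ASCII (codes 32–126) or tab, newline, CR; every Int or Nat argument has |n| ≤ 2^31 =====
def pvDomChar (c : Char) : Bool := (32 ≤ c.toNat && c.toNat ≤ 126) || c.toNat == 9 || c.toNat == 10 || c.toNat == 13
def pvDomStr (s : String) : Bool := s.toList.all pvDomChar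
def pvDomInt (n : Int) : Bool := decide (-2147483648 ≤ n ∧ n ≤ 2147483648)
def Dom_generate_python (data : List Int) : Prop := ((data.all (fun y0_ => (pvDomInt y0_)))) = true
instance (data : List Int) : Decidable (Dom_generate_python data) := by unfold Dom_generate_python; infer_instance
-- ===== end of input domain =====

-- B replaces A's per-byte loop with modulo-15 separator insertion by a chunk-into-lines-then-join
-- decomposition (objective: simpler); return values proved equal on all inputs.

-- '\\x%02x' % x : backslash-x, then x in lowercase hex zero-padded to width 2
-- ('%0Nx' pads with zeros after the sign, exactly PySem.Str.zfill; negative x renders as '-<hex of |x|>').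
def pyHexLit (x : Int) : String :=
  "\\x" ++ PySem.Str.zfill
    (if x < 0 then "-" ++ String.ofList (Nat.toDigits 16 x.natAbs)
     else String.ofList (Nat.toDigits 16 x.toNat)) 2

-- ===== PORT A =====
-- the for-loop over enumerate(data): res is the accumulator, idx the (nonnegative) loop
-- counter, so Python's idx % 15 is Nat %.
def aLoop : String → Nat → List Int → String
  | res, _, [] => res
  | res, idx, x :: xs =>
    aLoop ((if idx % 15 = 0 ∧ idx ≠ 0 then res ++ "\"\n    \"" else res) ++ pyHexLit x)
      (idx + 1) xs

def generate_python (data : List Int) : String :=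
  aLoop "payload = (\n    \"" 0 data ++ "\"\n)"

-- ===== PORT B =====
-- ''.join('\\x%02x' % x for x in chunk)
def bLine (chunk : List Int) : String := PySem.Str.join "" (chunk.map pyHexLit)

-- the while-rest loop: rest[:15] / rest[15:] with nonnegative bounds are take/drop (exact)
def bLines : List Int → List String
  | [] => []
  | x :: xs => bLine (List.take 15 (x :: xs)) :: bLines (List.drop 15 (x :: xs))
termination_by l => l.length
decreasing_by simp only [List.length_drop, List.length_cons]; omega

def generate_python_alt (data : List Int) : String :=
  "payload = (\n    \"" ++ PySem.Str.join "\"\n    \"" (bLines data) ++ "\"\n)"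

-- ===== PRECONDITION & SPEC =====
def Spec_generate_python (data : List Int) (out : String) : Prop := out = generate_python_alt data
instance (data : List Int) (out : String) : Decidable (Spec_generate_python data out) := by unfold Spec_generate_python; infer_instance

-- ===== CLAIM (what is proved, stated in full; the proofs are below) =====
def Claim_equal_generate_python : Prop := ∀ (data : List Int), Dom_generate_python data → Spec_generate_python data (generate_python data)

-- ===== LEMMAS AND PROOFS =====
-- The whole argument lives on List Char (String.toList is injective).
def hexL (x : Int) : List Char := (pyHexLit x).toList

def sepL : List Char := "\"\n    \"".toList

def aLoopL : List Char → Nat → List Int → List Char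
  | res, _, [] => res
  | res, idx, x :: xs =>
    aLoopL ((if idx % 15 = 0 ∧ idx ≠ 0 then res ++ sepL else res) ++ hexL x) (idx + 1) xs

lemma toList_aLoop (xs : List Int) : ∀ (res : String) (idx : Nat),
    (aLoop res idx xs).toList = aLoopL res.toList idx xs := by
  induction xs with
  | nil => intro res idx; rfl
  | cons x xs ih =>
    intro res idx
    simp only [aLoop, aLoopL, ih]
    split_ifs with h <;> simp [String.toList_append, hexL, sepL]

def lineL (chunk : List Int) : List Char := PySem.Chars.join [] (chunk.map hexL)

lemma toList_bLine (chunk : List Int) : (bLine chunk).toList = lineL chunk := by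
  simp [bLine, lineL, PySem.Str.toList_join, List.map_map]
  rfl

lemma lineL_cons (x : Int) (c : List Int) : lineL (x :: c) = hexL x ++ lineL c := by
  cases c with
  | nil => simp [lineL, PySem.Chars.join_singleton, PySem.Chars.join_nil]
  | cons y ys => simp [lineL, PySem.Chars.join_cons_cons]

def tailJoinL : List (List Char) → List Char
  | [] => []
  | l :: ls => sepL ++ l ++ tailJoinL ls

lemma join_eq_tail : ∀ (ls : List (List Char)) (a : List Char),
    PySem.Chars.join sepL (a :: ls) = a ++ tailJoinL ls := by
  intro ls
  induction ls with
  | nil => intro a; simp [PySem.Chars.join_singleton, tailJoinL]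
  | cons b ls ih => intro a; simp [PySem.Chars.join_cons_cons, tailJoinL, ih]

lemma aLoopL_append : ∀ (l1 l2 : List Int) (res : List Char) (idx : Nat),
    aLoopL res idx (l1 ++ l2) = aLoopL (aLoopL res idx l1) (idx + l1.length) l2 := by
  intro l1
  induction l1 with
  | nil => intro l2 res idx; simp [aLoopL]
  | cons x xs ih =>
    intro l2 res idx
    simp only [List.cons_append, aLoopL, ih, List.length_cons]
    ring_nf

lemma bLines_nil : bLines [] = [] := by
  rw [bLines.eq_def]

lemma bLines_cons (x : Int) (xs : List Int) :
    bLines (x :: xs) = bLine (x :: List.take 14 xs) :: bLines (List.drop 14 xs) := by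
  rw [bLines.eq_def]
  simp [List.take_succ_cons, List.drop_succ_cons]

lemma aLoopL_nosep : ∀ (chunk : List Int) (res : List Char) (idx : Nat),
    idx % 15 + chunk.length ≤ 15 → (chunk = [] ∨ idx = 0 ∨ 0 < idx % 15) →
    aLoopL res idx chunk = res ++ lineL chunk := by
  intro chunk
  induction chunk with
  | nil => intro res idx _ _; simp [aLoopL, lineL, PySem.Chars.join_nil]
  | cons x c ih =>
    intro res idx hlen hz
    have hcond : ¬ (idx % 15 = 0 ∧ idx ≠ 0) := by
      rintro ⟨h1, h2⟩
      rcases hz with h | h | h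
      · exact absurd h (List.cons_ne_nil x c)
      · exact h2 h
      · omega
    simp only [List.length_cons] at hlen
    simp only [aLoopL, if_neg hcond]
    rw [ih (res ++ hexL x) (idx + 1) (by omega)
      (by
        by_cases hc : c = []
        · exact Or.inl hc
        · have hcp := List.length_pos_of_ne_nil hc
          right; right; omega)]
    simp [lineL_cons]

lemma aLoopL_chunks : ∀ (n : Nat) (data : List Int) (res : List Char) (idx : Nat),
    data.length ≤ n → idx % 15 = 0 → idx ≠ 0 →
    aLoopL res idx data = res ++ tailJoinL ((bLines data).map String.toList) := by
  intro n
  induction n with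
  | zero =>
    intro data res idx hlen _ _
    have : data = [] := List.eq_nil_of_length_eq_zero (by omega)
    subst this; simp [aLoopL, bLines_nil, tailJoinL]
  | succ n ih =>
    intro data res idx hlen hmod hz
    cases data with
    | nil => simp [aLoopL, bLines_nil, tailJoinL]
    | cons x xs =>
      have hcond : idx % 15 = 0 ∧ idx ≠ 0 := ⟨hmod, hz⟩
      simp only [aLoopL, if_pos hcond]
      conv_lhs => rw [← List.take_append_drop 14 xs]
      rw [aLoopL_append,
        aLoopL_nosep (List.take 14 xs) _ (idx + 1)
          (by have := List.length_take_le 14 xs; omega)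
          (by right; right; omega)]
      by_cases h : xs.length ≤ 14
      · rw [List.drop_eq_nil_of_le h]
        simp only [aLoopL, List.take_of_length_le h]
        rw [bLines_cons, List.take_of_length_le h, List.drop_eq_nil_of_le h, bLines_nil]
        simp [tailJoinL, toList_bLine, lineL_cons]
      · have htk : (List.take 14 xs).length = 14 := by simp; omega
        rw [htk, show idx + 1 + 14 = idx + 15 by ring,
          ih (List.drop 14 xs) _ (idx + 15) (by simp only [List.length_drop]; simp only [List.length_cons] at hlen; omega) (by omega) (by omega)]
        rw [bLines_cons]
        simp [tailJoinL, toList_bLine, lineL_cons]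

lemma aLoopL_main : ∀ (data : List Int) (res : List Char),
    aLoopL res 0 data = res ++ PySem.Chars.join sepL ((bLines data).map String.toList) := by
  intro data res
  cases data with
  | nil => simp [aLoopL, bLines_nil, PySem.Chars.join_nil]
  | cons x xs =>
    simp only [aLoopL]
    rw [if_neg (by simp)]
    conv_lhs => rw [← List.take_append_drop 14 xs]
    rw [aLoopL_append,
      aLoopL_nosep (List.take 14 xs) _ 1
        (by have := List.length_take_le 14 xs; omega)
        (by right; right; omega)]
    by_cases h : xs.length ≤ 14
    · rw [List.drop_eq_nil_of_le h]
      simp only [aLoopL, List.take_of_length_le h]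
      rw [bLines_cons, List.take_of_length_le h, List.drop_eq_nil_of_le h, bLines_nil]
      simp [PySem.Chars.join_singleton, toList_bLine, lineL_cons]
    · have htk : (List.take 14 xs).length = 14 := by simp; omega
      rw [htk, show (1 : Nat) + 14 = 15 by ring,
        aLoopL_chunks xs.length (List.drop 14 xs) _ 15 (by simp only [List.length_drop]; omega) (by omega) (by omega)]
      rw [bLines_cons]
      simp only [List.map_cons, join_eq_tail, toList_bLine, lineL_cons]
      simp

-- ===== VERDICT (by name: the statement is the Claim_ definition above) =====
theorem generate_python_spec : Claim_equal_generate_python := by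
  intro data _
  unfold Spec_generate_python generate_python generate_python_alt
  have h : (aLoop "payload = (\n    \"" 0 data ++ "\"\n)").toList
      = ("payload = (\n    \"" ++ PySem.Str.join "\"\n    \"" (bLines data) ++ "\"\n)").toList := by
    simp only [String.toList_append, toList_aLoop, aLoopL_main, PySem.Str.toList_join]
    have hsep : ("\"\n    \"" : String).toList = sepL := rfl
    simp [hsep]
  have h2 := congrArg String.ofList h
  rwa [String.ofList_toList, String.ofList_toList] at h2
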